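/-
  THE HEADLINE:    the compiled JSON tokenizer jsmn, run on the model of x86-64, (1) on every JSON text that fits produces exactly the tokens of the
                   text's parse tree, (2) on EVERY input that fits halts.

  WHICH CODE.  jsmn.h by Serge Zaitsev (MIT), UNMODIFIED (= proofs/c6/jsmn.c, sha256 c04533e9181e1e33baceb0f55ac449b05145bb936e8c68cc77dfe0d8277514fb),
               included by the 30-line proofs/c6/shim.c: `jsmn_main(js, len, out, num_tokens)` = jsmn_init on a parser on the stack + ONE jsmn_parse with the
               token array at out + 4; it stores the result `r` (an int, little-endian) at out + 0 and returns the number of output bytes: 4 if r < 0, else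
               4 + r * sizeof(jsmntok_t) — + the entry stub proofs/c6/start.S (four loads of the arguments, call jsmn_main, two stores of rax, hlt).
               Two configurations of the same source: DEFAULT (`jsmnProgram`; jsmn_d.bin, 1579 bytes; jsmntok_t = {type, start, end, size}, 16 bytes) and
               -DJSMN_STRICT -DJSMN_PARENT_LINKS (`jsmnProgramStrict`; jsmn_s.bin, 2192 bytes; 20 bytes per token: + parent).
               Compiled by gcc 12.2 with the flags of proofs/c6/build.sh (BUILD.txt: -Og -ffreestanding -fno-builtin -mgeneral-regs-only -mno-red-zone
               -fomit-frame-pointer … , the flags of the gzip proofs unchanged), linked flat at 100000H; the byte lists are JsmnDBytes.image_bytes /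
               JsmnSBytes.image_bytes (Prog/Jsmn/Jsmn{D,S}Bytes.lean), generated from the .bin files.
  WHAT `exec` OBSERVES — the conventions a reader must know (`Program`, `start`, `readOut`, `Outputs`, `exec`: X86/Derived/Prog/Harness.lean of the model, shared with the gzip headline).
    start   = the machine the model's interpreter builds for the test harness (`Interp.setup`: 64-bit long mode, 16 MB identity-mapped, RING 0 — the stub ends
              in HLT, which is privileged), with the harness's memory file (proofs/c6/harness.py `model_main`) loaded at 100000H: the code, the parameter block
              at 1FF000H = [js = 200000H, len, out = 400000H, num_tokens], the text at 200000H; RSP = 800000H. Unwritten RAM reads 0.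
    output  = the `rax` bytes at 400000H, read when the processor HAS HALTED AND STAYS HALTED (`Outputs`); `X86.run` — of the full machine, with the model's own
              decoder over all instruction rows — is a function: the output is unique, `exec μ p ub s` is it (`none` if the run never halts).
    N       = num_tokens is a CONSTANT of each program: 3F000H (258,048) tokens for the default build, 32000H (204,800) for the strict one: the token array
              ends below the stack. A text with more tokens gets JSMN_ERROR_NOMEM (and still halts: `jsmn_always_halts`).
    Fits s  = s.length ≤ 1FF000H (2 MB - 4 KB: the harness's input buffer).
  WHAT A JSON TEXT IS (Json/Grammar.lean = RFC 8259 as a Lean definition): `JsonText s w1 t w2`: s = w1 ++ t.text ++ w2 for a well-formed concrete syntax tree `t`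
  (`Json.Layout`: the value with the insignificant whitespace of this rendering) between whitespace w1, w2. `tokensOf w1 t` = `t.tokens …` (Json/Jsmn/Expected.lean):
  one token per node in pre-order (keys are nodes) = (type, start, end, size[, parent]) as jsmn documents them; they depend on the text only (`Jsmn.tokens_unique`).
  HOW IT IS PROVED. Function by function the compiled code is shown to compute a pure model shaped like the C (Json/Jsmn/Model.lean): Prog/Jsmn/D/*.lean, S/*.lean
  (all 460 / 491 instructions of the two binaries; closed in D/Closed.lean, S/Closed.lean: `main_closed`); the model is shown correct on valid JSON
  (Json/Jsmn/Correct*.lean) and total (Json/Jsmn/Total.lean); the stub, the start machine and the final HLT are Prog/Jsmn/Start*.lean; Prog/Jsmn/Runs.lean joins them.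
  WHAT IS ASSUMED. `Fits s`, the bound on the number of tokens where a theorem has one, and `MicroOK μ`: the processor description is an Intel part whose
  vendor fields agree (X86/Derived/Prog/Reach.lean). Nothing about the binaries, the compiler or jsmn.
  IT IS MET: `OnX86.microOK_interp` — the processor description the interpreters of the tree run with (Granite Rapids) satisfies `MicroOK`.
  `ub` is THE UNKNOWN STREAM of the start machine: the bits the processor answers with wherever the manuals leave a value undefined
  (`Machine.unknownBits`; `Interp.setup` builds the machine whose stream is all zeros, `start p s ub` is that machine with the stream `ub`). Every
  theorem is for every `ub`: whatever a processor does with its undefined flags and values.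
  THE AXIOMS (the last lines of this file print them into the build log): `propext`, `Classical.choice`, `Quot.sound`, and the certificates of `bv_decide` —
  axioms named `<theorem>._native.bv_decide.ax_…`, one for each closed bit-vector fact that the model's lemma libraries (namespaces X86.Word, X86.TB,
  X86.User) prove with that tactic. Such an axiom says that the verified checker accepts the SAT solver's certificate; it is asserted because compiled code
  evaluated the check, so it carries the trust in the Lean compiler that `native_decide` asks for. This package itself uses no `bv_decide`, no
  `native_decide`, no `sorry` and declares no axiom.
-/
import Prog.Jsmn.Runs
import Prog.Jsmn.D.Closed
import Prog.Jsmn.S.Closed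
import X86.Derived.Prog.Harness

namespace JsmnOnX86
open X86 (Microarch MicroOK)
open X86.J6 (binD binS)
open OnX86        -- Program, start, readOut, Outputs, exec (X86/Derived/Prog/Harness.lean)

/-- jsmn_d.bin (default configuration) and its stub: `jsmn_main(js = 200000H, len, out = 400000H, num_tokens = 3F000H)`. -/
def jsmnProgram : Program := ⟨fun s => X86.J6.Start.jsmnImage binD s 0x3F000, 0x100000, 0x800000⟩

/-- jsmn_s.bin (-DJSMN_STRICT -DJSMN_PARENT_LINKS) and its stub: `jsmn_main(js = 200000H, len, out = 400000H, num_tokens = 32000H)`. -/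
def jsmnProgramStrict : Program := ⟨fun s => X86.J6.Start.jsmnImage binS s 0x32000, 0x100000, 0x800000⟩

/-- `s` is a JSON text (RFC 8259 §2: ws value ws): the rendering of the well-formed tree `t` between the whitespace `w1` and `w2`. -/
structure JsonText (s w1 : List UInt8) (t : Json.Layout) (w2 : List UInt8) : Prop where
  text : s = w1 ++ t.text ++ w2
  lead : Json.IsWs w1
  tree : t.WellFormed
  trail : Json.IsWs w2

/-- The tokens jsmn should produce for the tree `t` rendered behind `w1`: one per node, in pre-order (Json/Jsmn/Expected.lean). -/
def tokensOf (w1 : List UInt8) (t : Json.Layout) : List Jsmn.Token := t.tokens w1.length 0 (-1)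

/-- jsmn_main's output for a successful parse: the number of tokens (4 bytes, little-endian), then the tokens (16 bytes each; 20 with parent links). -/
def encode (cfg : Jsmn.Config) (ts : List Jsmn.Token) : List UInt8 := Jsmn.le32 ts.length ++ ts.flatMap (Jsmn.Token.bytes cfg)

/-- The input fits the harness's buffer. -/
def Fits (s : List UInt8) : Prop := s.length ≤ 0x1FF000

variable (μ : Microarch) (hμ : MicroOK μ) (ub : Nat → Bool)
include hμ

/-- **jsmn is correct on valid JSON, on the machine** (default build): on every JSON text that fits, with at most 3F000H tokens, the compiled tokenizer halts with
the number of tokens and exactly the tokens of the text's parse tree — on every processor `μ` with `MicroOK μ` (Intel, coherent). -/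
theorem jsmn_on_valid_json (s w1 : List UInt8) (t : Json.Layout) (w2 : List UInt8) (h : JsonText s w1 t w2)
    (fits : Fits s) (room : t.count ≤ 0x3F000) :
    exec μ jsmnProgram ub s = some (encode .default (tokensOf w1 t)) := by
  obtain ⟨rfl, hw1, wf, hw2⟩ := h
  have : Outputs μ jsmnProgram ub _ _ := X86.J6.Runs.valid_outputs_D μ hμ ub (X86.J6.D.main_closed _) w1 t w2 hw1 hw2 wf fits room
  exact exec_eq_some_iff.2 (by simpa only [encode, tokensOf, Json.Layout.tokens_length] using this)

/-- **jsmn always halts, on the machine** (default build): on EVERY input that fits — JSON or not — the run halts with some output (it is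
`Jsmn.encodeResult` of what the pure model answers: `X86.J6.Runs.always_outputs_D`). -/
theorem jsmn_always_halts (s : List UInt8) (fits : Fits s) : ∃ out, exec μ jsmnProgram ub s = some out := by
  obtain ⟨r, _, ts', _, h⟩ := X86.J6.Runs.always_outputs_D μ hμ ub (X86.J6.D.main_closed _) s fits
  exact ⟨_, exec_eq_some_iff.2 h⟩

/-- **The strict build on valid JSON** (tokens with their parent links): the same, PROVIDED a top-level number / true / false / null is followed by whitespace. -/
theorem jsmn_strict_on_valid_json (s w1 : List UInt8) (t : Json.Layout) (w2 : List UInt8) (h : JsonText s w1 t w2)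
    (sep : t.isPrimitive = true → w2 ≠ []) (fits : Fits s) (room : t.count ≤ 0x32000) :
    exec μ jsmnProgramStrict ub s = some (encode .strictLinks (tokensOf w1 t)) := by
  obtain ⟨rfl, hw1, wf, hw2⟩ := h
  have : Outputs μ jsmnProgramStrict ub _ _ := X86.J6.Runs.valid_outputs_S μ hμ ub (X86.J6.S.main_closed _) w1 t w2 hw1 hw2 wf sep fits room
  exact exec_eq_some_iff.2 (by simpa only [encode, tokensOf, Json.Layout.tokens_length] using this)

/-- **Where the strict build differs from RFC 8259**: a JSON text that is a bare number / true / false / null with nothing behind it (`42`) is REJECTED with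
JSMN_ERROR_PART: the output is the four bytes of -3. -/
theorem jsmn_strict_rejects_bare_primitive (s w1 : List UInt8) (t : Json.Layout) (h : JsonText s w1 t [])
    (prim : t.isPrimitive = true) (fits : Fits s) :
    exec μ jsmnProgramStrict ub s = some (Jsmn.le32 (-3)) := by
  obtain ⟨rfl, hw1, wf, _⟩ := h
  rw [List.append_nil] at fits ⊢
  exact exec_eq_some_iff.2 (X86.J6.Runs.bare_primitive_outputs_S μ hμ ub (X86.J6.S.main_closed _) w1 t hw1 wf prim fits)

/-- **The strict build always halts.** -/
theorem jsmn_strict_always_halts (s : List UInt8) (fits : Fits s) : ∃ out, exec μ jsmnProgramStrict ub s = some out := by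
  obtain ⟨r, _, ts', _, h⟩ := X86.J6.Runs.always_outputs_S μ hμ ub (X86.J6.S.main_closed _) s fits
  exact ⟨_, exec_eq_some_iff.2 h⟩

end JsmnOnX86

#print axioms JsmnOnX86.jsmn_on_valid_json
#print axioms JsmnOnX86.jsmn_always_halts
#print axioms JsmnOnX86.jsmn_strict_on_valid_json
#print axioms JsmnOnX86.jsmn_strict_rejects_bare_primitive
#print axioms JsmnOnX86.jsmn_strict_always_halts
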